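-- pv_equiv track=rewrite | github.com/PaulDuvall/ai-development-patterns | scripts/validate-pattern-names.py | has_negative_indicator
-- ===== SOURCE A (Python) =====
-- NEGATIVE_PREFIXES = {
--     'broken', 'blind', 'over', 'under', 'false', 'un', 'premature',
--     'reckless', 'static', 'manual', 'scattered', 'chaotic', 'unsafe',
--     'reactive', 'confused', 'ignored', 'wasteful', 'overwhelming',
--     'unchecked', 'redundant', 'shallow', 'hardcoded', 'contextless',
--     'unprotected', 'overlapping', 'unplanned', 'isolated', 'monolithic',
--     'bloated', 'unconstrained', 'constraint', 'delayed', 'undocumented',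
--     'random', 'unrestricted'
-- }
--
-- def has_negative_indicator(name: str) -> bool:
--     """Check if antipattern name has a negative prefix or modifier."""
--     words = name.lower().split()
--     if not words:
--         return False
--
--     # Check first word for negative prefix
--     first_word = words[0].replace('-', '')
--
--     # Check if first word starts with negative prefix
--     for prefix in NEGATIVE_PREFIXES:
--         if first_word.startswith(prefix):
--             return True
--
--     # Check if first word IS a negative modifier
--     if first_word in NEGATIVE_PREFIXES:
--         return True
--
--     return False
-- ===== SOURCE B (Python) =====
-- NEGATIVE_PREFIXES = {
--     'broken', 'blind', 'over', 'under', 'false', 'un', 'premature',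
--     'reckless', 'static', 'manual', 'scattered', 'chaotic', 'unsafe',
--     'reactive', 'confused', 'ignored', 'wasteful', 'overwhelming',
--     'unchecked', 'redundant', 'shallow', 'hardcoded', 'contextless',
--     'unprotected', 'overlapping', 'unplanned', 'isolated', 'monolithic',
--     'bloated', 'unconstrained', 'constraint', 'delayed', 'undocumented',
--     'random', 'unrestricted'
-- }
--
-- MAX_PREFIX_LEN = max(len(p) for p in NEGATIVE_PREFIXES)
--
-- def has_negative_indicator(name: str) -> bool:
--     """Check if antipattern name has a negative prefix or modifier."""
--     words = name.lower().split()
--     if not words: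
--         return False
--
--     first_word = words[0].replace('-', '')
--
--     # Walk the prefixes of the word itself (no longer than the longest set
--     # element) and ask the set for each one; the exact-match case is the
--     # prefix of full length.
--     for i in range(1, min(len(first_word), MAX_PREFIX_LEN) + 1):
--         if first_word[:i] in NEGATIVE_PREFIXES:
--             return True
--     return False
-- ===== Notes on version B (the rewrite author's own statement) =====
-- stated objective: alternative
-- what changed: Instead of scanning the 35-element prefix set calling startswith (plus a redundant exact-membership check), B iterates over the first word's own prefixes first_word[:i] up to min(len(word), longest set element) and tests set membership, inverting the traversal; the exact-match check collapses into the full-length prefix.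
import Mathlib
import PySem

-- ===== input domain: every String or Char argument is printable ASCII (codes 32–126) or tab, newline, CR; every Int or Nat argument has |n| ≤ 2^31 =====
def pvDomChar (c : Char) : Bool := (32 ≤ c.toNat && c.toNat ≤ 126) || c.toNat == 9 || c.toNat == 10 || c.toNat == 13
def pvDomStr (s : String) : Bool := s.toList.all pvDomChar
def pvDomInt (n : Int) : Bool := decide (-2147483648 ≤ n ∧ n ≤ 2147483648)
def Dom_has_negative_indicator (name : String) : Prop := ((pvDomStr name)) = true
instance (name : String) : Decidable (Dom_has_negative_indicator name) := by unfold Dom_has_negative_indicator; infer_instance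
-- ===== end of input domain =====

-- B inverts the traversal: instead of scanning the prefix set with startswith (plus a
-- redundant exact-membership check), it walks the first word's own prefixes and asks the
-- set for each one (objective: alternative; not claimed faster).

-- ===== PORT A =====
-- the module constant NEGATIVE_PREFIXES (a Python set; its iteration order never affects the result)
def pvNegPrefixes : PySem.Set String := PySem.Set.ofList
  ["broken", "blind", "over", "under", "false", "un", "premature",
   "reckless", "static", "manual", "scattered", "chaotic", "unsafe",
   "reactive", "confused", "ignored", "wasteful", "overwhelming",
   "unchecked", "redundant", "shallow", "hardcoded", "contextless",
   "unprotected", "overlapping", "unplanned", "isolated", "monolithic",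
   "bloated", "unconstrained", "constraint", "delayed", "undocumented",
   "random", "unrestricted"]

def has_negative_indicator (name : String) : Bool :=
  let words := PySem.Str.split₀ (PySem.Str.lower name)
  match words with
  | [] => false
  | w :: _ =>
    let firstWord := PySem.Str.replace w "-" ""
    -- for prefix in NEGATIVE_PREFIXES: if first_word.startswith(prefix): return True
    if pvNegPrefixes.any (fun p => PySem.Str.startswith firstWord p) then true
    -- if first_word in NEGATIVE_PREFIXES: return True
    else if pvNegPrefixes.contains firstWord then true
    else false

-- ===== PORT B =====
-- MAX_PREFIX_LEN = max(len(p) for p in NEGATIVE_PREFIXES)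
def pvMaxPrefixLen : Int := ((pvNegPrefixes.map PySem.Str.len).max?).getD 0

def has_negative_indicator_alt (name : String) : Bool :=
  let words := PySem.Str.split₀ (PySem.Str.lower name)
  match words with
  | [] => false
  | w :: _ =>
    let firstWord := PySem.Str.replace w "-" ""
    -- for i in range(1, min(len(first_word), MAX_PREFIX_LEN) + 1): if first_word[:i] in NEGATIVE_PREFIXES: return True
    (PySem.List.pyRange 1 (min (PySem.Str.len firstWord) pvMaxPrefixLen + 1) 1).any (fun i =>
      pvNegPrefixes.contains (PySem.Str.slice firstWord none (some i)))

-- ===== PRECONDITION & SPEC =====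
def Spec_has_negative_indicator (name : String) (out : Bool) : Prop := out = has_negative_indicator_alt name
instance (name : String) (out : Bool) : Decidable (Spec_has_negative_indicator name out) := by unfold Spec_has_negative_indicator; infer_instance

-- ===== CLAIM (what is proved, stated in full; the proofs are below) =====
def Claim_equal_has_negative_indicator : Prop := ∀ (name : String), Dom_has_negative_indicator name → Spec_has_negative_indicator name (has_negative_indicator name)

-- ===== LEMMAS AND PROOFS =====

-- every word in the prefix set is nonempty
lemma pvNegPrefixes_nonempty : ∀ p ∈ pvNegPrefixes, 0 < p.toList.length := by decide

-- no word in the prefix set is longer than MAX_PREFIX_LEN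
set_option maxRecDepth 8192 in
lemma pvNegPrefixes_short : ∀ p ∈ pvNegPrefixes, (p.toList.length : Int) ≤ pvMaxPrefixLen := by decide

-- the heart of the equivalence, on the already-preprocessed first word:
-- "some set element is a prefix of fw (or equals fw)" = "some prefix fw[:i], 1 ≤ i ≤ len, is in the set"
lemma hni_core (fw : String) :
    (if pvNegPrefixes.any (fun p => PySem.Str.startswith fw p) then true
     else if pvNegPrefixes.contains fw then true else false)
    = (PySem.List.pyRange 1 (min (PySem.Str.len fw) pvMaxPrefixLen + 1) 1).any (fun i =>
        pvNegPrefixes.contains (PySem.Str.slice fw none (some i))) := by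
  have hstep : ∀ a b : Bool, (if a then true else if b then true else false) = (a || b) := by
    decide
  rw [hstep, Bool.eq_iff_iff]
  simp only [Bool.or_eq_true, List.any_eq_true, PySem.List.mem_pyRange_one,
    PySem.Set.contains_iff]
  constructor
  · rintro (⟨p, hpS, hsw⟩ | hmem)
    · have hpre : p.toList <+: fw.toList := by
        rw [PySem.Str.startswith_eq] at hsw
        exact (PySem.Chars.startswith_iff _ _).mp hsw
      refine ⟨(p.toList.length : Int), ⟨?_, ?_⟩, ?_⟩
      · exact_mod_cast pvNegPrefixes_nonempty p hpS
      · have h1 := hpre.length_le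
        have h2 := pvNegPrefixes_short p hpS
        rw [PySem.Str.len_eq]
        omega
      · have : PySem.Str.slice fw none (some (p.toList.length : Int)) = p := by
          apply String.toList_inj.mp
          rw [PySem.Str.toList_slice, PySem.Chars.slice_eq_listSlice,
            PySem.List.slice_to _ (by positivity)]
          simp only [Int.toNat_natCast]
          exact (List.prefix_iff_eq_take.mp hpre).symm
        rw [this]; exact hpS
    · refine ⟨(fw.toList.length : Int), ⟨?_, ?_⟩, ?_⟩
      · exact_mod_cast pvNegPrefixes_nonempty fw hmem
      · have h2 := pvNegPrefixes_short fw hmem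
        rw [PySem.Str.len_eq]; omega
      · have : PySem.Str.slice fw none (some (fw.toList.length : Int)) = fw := by
          apply String.toList_inj.mp
          rw [PySem.Str.toList_slice, PySem.Chars.slice_eq_listSlice,
            PySem.List.slice_to _ (by positivity)]
          simp
        rw [this]; exact hmem
  · rintro ⟨i, ⟨h1, _⟩, hmem⟩
    left
    refine ⟨PySem.Str.slice fw none (some i), hmem, ?_⟩
    rw [PySem.Str.startswith_eq]
    apply (PySem.Chars.startswith_iff _ _).mpr
    rw [PySem.Str.toList_slice, PySem.Chars.slice_eq_listSlice,
      PySem.List.slice_to _ (by omega)]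
    exact List.take_prefix _ _

-- ===== VERDICT (by name: the statement is the Claim_ definition above) =====
theorem has_negative_indicator_spec : Claim_equal_has_negative_indicator := by
  intro name _
  unfold Spec_has_negative_indicator has_negative_indicator has_negative_indicator_alt
  cases PySem.Str.split₀ (PySem.Str.lower name) with
  | nil => rfl
  | cons w ws => exact hni_core (PySem.Str.replace w "-" "")
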